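-- pv_equiv track=rewrite | github.com/Michaeloye/python-journey | simp-py-code/checking_credit_card_number_DanielLiang.py | sum_of_double_even_placed_num
-- ===== SOURCE A (Python) =====
-- def sum_of_double_even_placed_num(num):
--     result = 0
--     while num > 0:
--         number = num // 10 # if num is 4567898 to get 9,7 and 5 the even placed numbers from the right after running you get 456789... 45678 you get 4567
--         even_placed_num = number % 10 # you get 9... you get 7
--         num = number // 10 # 456789: you will get 45678 back to var number
--
--         double_even_placed_num = even_placed_num * 2
--
--         if double_even_placed_num > 9:
--             answer = double_even_placed_num % 10
--             double_even_placed_num = double_even_placed_num // 10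
--             result += answer
--         if double_even_placed_num < 10:
--             result += double_even_placed_num
--     return result
-- ===== SOURCE B (Python) =====
-- def sum_of_double_even_placed_num(num):
--     if num <= 0:
--         return 0
--     total = 0
--     rev = str(num)[::-1]
--     while len(rev) > 1:
--         d = int(rev[1]) * 2
--         total += d if d <= 9 else d - 9
--         rev = rev[2:]
--     return total
-- ===== Notes on version B (the rewrite author's own statement) =====
-- stated objective: alternative
-- what changed: Replaces arithmetic digit extraction (repeated //10, %10) and the two-branch doubled-digit split with a pairwise walk over the reversed decimal string using the closed-form Luhn reduction d if d<=9 else d-9.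
import Mathlib
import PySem

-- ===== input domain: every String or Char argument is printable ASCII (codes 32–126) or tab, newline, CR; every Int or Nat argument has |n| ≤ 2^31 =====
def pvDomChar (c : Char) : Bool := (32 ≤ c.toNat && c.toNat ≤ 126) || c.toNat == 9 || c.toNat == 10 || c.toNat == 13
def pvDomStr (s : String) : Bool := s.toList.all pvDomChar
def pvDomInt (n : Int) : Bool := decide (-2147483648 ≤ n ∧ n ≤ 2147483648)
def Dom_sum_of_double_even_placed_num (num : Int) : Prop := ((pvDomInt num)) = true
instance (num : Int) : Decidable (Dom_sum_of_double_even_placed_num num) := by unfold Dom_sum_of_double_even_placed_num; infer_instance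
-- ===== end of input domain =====

-- B replaces A's arithmetic digit extraction by a pairwise walk over the reversed decimal
-- string with the closed-form Luhn reduction (alternative decomposition, same cost).


-- ===== PORT A =====
-- the while loop of A: state (num, result)
def aLoop (num result : Int) : Int :=
  if _h : num > 0 then
    let number := PySem.Int.floordiv num 10
    let evenPlaced := PySem.Int.mod number 10
    let num' := PySem.Int.floordiv number 10
    let d := evenPlaced * 2
    if d > 9 then
      let answer := PySem.Int.mod d 10
      let d2 := PySem.Int.floordiv d 10
      let result2 := result + answer
      if d2 < 10 then aLoop num' (result2 + d2) else aLoop num' result2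
    else
      if d < 10 then aLoop num' (result + d) else aLoop num' result
  else result
termination_by num.toNat
decreasing_by
  all_goals
    simp only [PySem.Int.floordiv_eq_ediv_of_pos (by omega : (0:Int) < 10)]
    omega

def sum_of_double_even_placed_num (num : Int) : Int := aLoop num 0

-- ===== PORT B =====
-- the while loop of B: rev shrinks by two each turn (rev = rev[2:]);
-- int(rev[1]) is ported as (ofChars? [b]).getD 0 — rev[1] is always a decimal digit of str(num), so ofChars? is never none there
def bLoop (acc : Int) : List Char → Int
  | _a :: b :: rest =>
      bLoop (acc + (let d := (PySem.Int.ofChars? [b]).getD 0 * 2; if d ≤ 9 then d else d - 9)) rest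
  | _ => acc

def sum_of_double_even_placed_num_alt (num : Int) : Int :=
  if num ≤ 0 then 0
  else
    -- rev = str(num)[::-1]
    let rev := (PySem.List.slice? (PySem.Int.toChars num) none none (-1)).getD []
    bLoop 0 rev

-- ===== PRECONDITION & SPEC =====
def Spec_sum_of_double_even_placed_num (num : Int) (out : Int) : Prop := out = sum_of_double_even_placed_num_alt num
instance (num : Int) (out : Int) : Decidable (Spec_sum_of_double_even_placed_num num out) := by unfold Spec_sum_of_double_even_placed_num; infer_instance

-- ===== CLAIM (what is proved, stated in full; the proofs are below) =====
def Claim_equal_sum_of_double_even_placed_num : Prop := ∀ (num : Int), Dom_sum_of_double_even_placed_num num → Spec_sum_of_double_even_placed_num num (sum_of_double_even_placed_num num)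

-- ===== LEMMAS AND PROOFS =====

-- common spec over the little-endian digit list
def luhnSpec : List Nat → Int
  | _ :: b :: rest => (if ((b : Int) * 2) ≤ 9 then (b : Int) * 2 else (b : Int) * 2 - 9) + luhnSpec rest
  | _ => 0

-- toDigitsCore is the big-endian digit-character list (positive n, enough fuel)
lemma toDigitsCore_eq (fuel : Nat) : ∀ n l, 0 < n → n < fuel →
    Nat.toDigitsCore 10 fuel n l = ((Nat.digits 10 n).map Nat.digitChar).reverse ++ l := by
  induction fuel with
  | zero => intro n l hn hf; omega
  | succ f ih =>
    intro n l hn hf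
    rw [Nat.toDigitsCore]
    by_cases h : n / 10 = 0
    · simp [h, Nat.digits_def' (by omega : 1 < 10) hn]
    · rw [if_neg h, ih (n / 10) _ (by omega) (by omega),
        Nat.digits_def' (by omega : 1 < 10) hn]
      simp

lemma toChars_pos (num : Int) (h : 0 < num) :
    PySem.Int.toChars num = ((Nat.digits 10 num.toNat).map Nat.digitChar).reverse := by
  rw [PySem.Int.toChars, if_neg (by omega), Nat.toDigits,
    toDigitsCore_eq _ _ _ (by omega) (by omega)]
  simp

lemma ofChars_digitChar (d : Nat) (hd : d < 10) :
    (PySem.Int.ofChars? [Nat.digitChar d]).getD 0 = (d : Int) := by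
  interval_cases d <;> decide

-- B's loop on a digit-char list computes luhnSpec
lemma bLoop_eq (ds : List Nat) : ∀ acc, (∀ d ∈ ds, d < 10) →
    bLoop acc (ds.map Nat.digitChar) = acc + luhnSpec ds := by
  induction ds using luhnSpec.induct with
  | case1 a b rest ih =>
    intro acc hlt
    simp only [List.map_cons, bLoop, luhnSpec]
    rw [ih _ (by intro d hd; exact hlt d (by simp [hd]))]
    rw [ofChars_digitChar b (hlt b (by simp))]
    split_ifs <;> ring
  | case2 ds h =>
    intro acc hlt
    match ds, h with
    | [], _ => simp [bLoop, luhnSpec]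
    | [a], _ => simp [bLoop, luhnSpec]
    | a :: b :: rest, h => exact (h a b rest rfl).elim

-- unfolding equation for A's loop, with the two ifs collapsed to the Luhn reduction
lemma aLoop_pos (num result : Int) (h : 0 < num) :
    aLoop num result =
      aLoop (PySem.Int.floordiv (PySem.Int.floordiv num 10) 10)
        (result + (if PySem.Int.mod (PySem.Int.floordiv num 10) 10 * 2 ≤ 9
                   then PySem.Int.mod (PySem.Int.floordiv num 10) 10 * 2
                   else PySem.Int.mod (PySem.Int.floordiv num 10) 10 * 2 - 9)) := by
  rw [aLoop, dif_pos h]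
  have h10 : (0:Int) < 10 := by omega
  simp only [PySem.Int.floordiv_eq_ediv_of_pos h10, PySem.Int.mod_eq_emod_of_pos h10]
  split_ifs <;> first | omega | (congr 1; omega)

-- A's loop computes luhnSpec of the digit list
lemma aLoop_spec (n : Nat) : ∀ (result : Int), aLoop (n : Int) result = result + luhnSpec (Nat.digits 10 n) := by
  induction n using Nat.strong_induction_on with
  | _ n ih =>
    intro result
    by_cases hn : 0 < n
    · rw [aLoop_pos _ _ (by exact_mod_cast hn)]
      have h10 : (0:Int) < 10 := by omega
      have e1 : PySem.Int.floordiv (n : Int) 10 = ((n / 10 : Nat) : Int) := by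
        rw [PySem.Int.floordiv_eq_ediv_of_pos h10]; omega
      have e2 : PySem.Int.floordiv ((n / 10 : Nat) : Int) 10 = ((n / 10 / 10 : Nat) : Int) := by
        rw [PySem.Int.floordiv_eq_ediv_of_pos h10]; omega
      have e3 : PySem.Int.mod ((n / 10 : Nat) : Int) 10 = ((n / 10 % 10 : Nat) : Int) := by
        rw [PySem.Int.mod_eq_emod_of_pos h10]; omega
      rw [e1, e3, e2, ih (n / 10 / 10) (by omega),
        Nat.digits_def' (by omega : 1 < 10) hn]
      by_cases h2 : 0 < n / 10
      · rw [Nat.digits_def' (by omega : 1 < 10) h2]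
        simp only [luhnSpec]
        split_ifs <;> ring
      · have h0 : n / 10 = 0 := by omega
        simp [h0, luhnSpec]
    · have h0 : n = 0 := by omega
      subst h0
      rw [aLoop, dif_neg (by omega)]
      simp [luhnSpec]

-- ===== VERDICT (by name: the statement is the Claim_ definition above) =====
theorem sum_of_double_even_placed_num_spec : Claim_equal_sum_of_double_even_placed_num := by
  intro num _
  unfold Spec_sum_of_double_even_placed_num
  unfold sum_of_double_even_placed_num sum_of_double_even_placed_num_alt
  by_cases h : num ≤ 0
  · rw [if_pos h, aLoop, dif_neg (by omega)]
  · rw [if_neg h]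
    simp only [PySem.List.slice?_none_none_neg_one, Option.getD_some]
    rw [toChars_pos num (by omega), List.reverse_reverse,
      bLoop_eq _ 0 (fun d hd => Nat.digits_lt_base (by omega) hd)]
    have hA : aLoop num 0 = 0 + luhnSpec (Nat.digits 10 num.toNat) := by
      have h' : ((num.toNat : Int)) = num := by omega
      conv_lhs => rw [← h']
      rw [aLoop_spec]
    rw [hA]
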